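-- pv_equiv track=rewrite | github.com/p-lots/codewars | 7-kyu/grandma-learning-to-text/python/solution.py | textin
-- ===== SOURCE A (Python) =====
-- def textin(strng):
--     ret = []
--     for word in strng.split():
--         if word.lower() in ['too', 'two', 'to']:
--             ret.append('2')
--             continue
--         i = 0
--         temp = ''
--         while i < len(word):
--             if word[i:i + 3].lower() == 'too' or word[i:i + 3].lower() == 'two':
--                 temp += '2'
--                 i += 3
--             elif word[i:i + 2].lower() == 'to':
--                 temp += '2'
--                 i += 2
--             else:
--                 temp += word[i]
--                 i += 1
--         ret.append(temp)
--     return ' '.join(ret)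
-- ===== SOURCE B (Python) =====
-- import re
--
-- _PAT = re.compile(r'too|two|to', re.IGNORECASE)
--
-- def textin(strng):
--     return ' '.join(_PAT.sub('2', word) for word in strng.split())
-- ===== Notes on version B (the rewrite author's own statement) =====
-- stated objective: faster
-- what changed: Replaces A's hand-written positional while-loop (slice+lower and string concatenation at every index) plus its redundant whole-word special case by one compiled regex re.sub(r'too|two|to', '2', flags=IGNORECASE) applied to each word of strng.split(), relying on leftmost matching and ordered alternation for the 3-before-2 priority.
import Mathlib
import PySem

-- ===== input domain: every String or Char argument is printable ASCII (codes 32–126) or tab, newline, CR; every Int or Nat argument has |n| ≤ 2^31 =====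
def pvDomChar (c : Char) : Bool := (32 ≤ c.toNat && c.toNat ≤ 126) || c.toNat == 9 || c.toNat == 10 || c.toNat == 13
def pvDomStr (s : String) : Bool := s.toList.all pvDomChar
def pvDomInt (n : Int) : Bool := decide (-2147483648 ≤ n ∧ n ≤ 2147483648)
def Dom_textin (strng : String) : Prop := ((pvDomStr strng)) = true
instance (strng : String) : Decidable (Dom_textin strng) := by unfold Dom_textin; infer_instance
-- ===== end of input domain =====

-- B replaces A's index-based scanning loop and redundant whole-word special case by
-- ' '.join(re.sub('too|two|to', '2', word, flags=IGNORECASE) for word in split()).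

-- ===== PORT A =====
-- A's inner while-loop: index i over word w, accumulator temp
def textinLoopA (w : List Char) (i : Nat) (temp : List Char) : List Char :=
  if h : i < w.length then
    if PySem.Chars.lower (PySem.List.slice w (some (i : Int)) (some ((i : Int) + 3))) = "too".toList
       ∨ PySem.Chars.lower (PySem.List.slice w (some (i : Int)) (some ((i : Int) + 3))) = "two".toList then
      textinLoopA w (i + 3) (temp ++ ['2'])
    else if PySem.Chars.lower (PySem.List.slice w (some (i : Int)) (some ((i : Int) + 2))) = "to".toList then
      textinLoopA w (i + 2) (temp ++ ['2'])
    else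
      textinLoopA w (i + 1) (temp ++ [w[i]])
  else temp
  termination_by w.length - i

def textin (strng : String) : String :=
  let ret : List String :=
    (PySem.Str.split₀ strng).foldl (fun ret word =>
      if PySem.Str.lower word ∈ ["too", "two", "to"] then ret ++ ["2"]
      else ret ++ [String.ofList (textinLoopA word.toList 0 [])]) []
  PySem.Str.join " " ret

-- ===== PORT B =====
-- Hand port of re.sub('too|two|to', '2', w, flags=IGNORECASE) for this FIXED pattern
-- (no Lean regex library): leftmost non-overlapping scan, ordered alternation (first
-- alternative 'too'/'two', then 'to') tried case-insensitively at each position,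
-- unmatched characters copied through — exact for this pattern on every input.
def textinSubB (w : List Char) : List Char :=
  if PySem.Chars.lower (w.take 3) = "too".toList ∨ PySem.Chars.lower (w.take 3) = "two".toList then
    '2' :: textinSubB (w.drop 3)
  else if PySem.Chars.lower (w.take 2) = "to".toList then
    '2' :: textinSubB (w.drop 2)
  else if h : w ≠ [] then
    w.head h :: textinSubB (w.drop 1)
  else []
  termination_by w.length
  decreasing_by
  · have hne : w ≠ [] := by intro hw; subst hw; simp [PySem.Chars.lower] at *
    have := List.length_pos_of_ne_nil hne; simp; omega
  · have hne : w ≠ [] := by intro hw; subst hw; simp [PySem.Chars.lower] at *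
    have := List.length_pos_of_ne_nil hne; simp; omega
  · have := List.length_pos_of_ne_nil h; simp; omega

def textin_alt (strng : String) : String :=
  PySem.Str.join " " ((PySem.Str.split₀ strng).map (fun w => String.ofList (textinSubB w.toList)))

-- ===== PRECONDITION & SPEC =====
def Spec_textin (strng : String) (out : String) : Prop := out = textin_alt strng
instance (strng : String) (out : String) : Decidable (Spec_textin strng out) := by unfold Spec_textin; infer_instance

-- ===== CLAIM (what is proved, stated in full; the proofs are below) =====
def Claim_equal_textin : Prop := ∀ (strng : String), Dom_textin strng → Spec_textin strng (textin strng)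

-- ===== LEMMAS AND PROOFS =====

theorem textinSubB_nil : textinSubB [] = [] := by
  rw [textinSubB]; simp [PySem.Chars.lower]

-- A's loop at index i computes temp ++ B's recursion on the suffix from i
theorem textinLoopA_eq_subB (w : List Char) (i : Nat) (temp : List Char) :
    textinLoopA w i temp = temp ++ textinSubB (w.drop i) := by
  fun_induction textinLoopA w i temp with
  | case1 i temp h hc ih =>
    have hs := PySem.List.slice_natCast_add w i 3
    norm_num at hs
    rw [hs] at hc
    have hrhs : textinSubB (w.drop i) = '2' :: textinSubB (w.drop (i + 3)) := by
      rw [textinSubB, if_pos hc, List.drop_drop]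
    rw [ih, hrhs]
    simp
  | case2 i temp h hc3 hc2 ih =>
    have hs3 := PySem.List.slice_natCast_add w i 3
    have hs2 := PySem.List.slice_natCast_add w i 2
    norm_num at hs3 hs2
    rw [hs3] at hc3; rw [hs2] at hc2
    have hrhs : textinSubB (w.drop i) = '2' :: textinSubB (w.drop (i + 2)) := by
      rw [textinSubB, if_neg hc3, if_pos hc2, List.drop_drop]
    rw [ih, hrhs]
    simp
  | case3 i temp h hc3 hc2 ih =>
    have hs3 := PySem.List.slice_natCast_add w i 3
    have hs2 := PySem.List.slice_natCast_add w i 2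
    norm_num at hs3 hs2
    rw [hs3] at hc3; rw [hs2] at hc2
    have hne : w.drop i ≠ [] := by
      simp [List.drop_eq_nil_iff]; omega
    have hhead : (w.drop i).head hne = w[i] := by
      rw [List.head_eq_getElem]; simp
    have hrhs : textinSubB (w.drop i) = w[i] :: textinSubB (w.drop (i + 1)) := by
      rw [textinSubB, if_neg hc3, if_neg hc2, dif_pos hne, hhead, List.drop_drop]
    rw [ih, hrhs]
    simp
  | case4 i temp h =>
    have : w.drop i = [] := List.drop_eq_nil_of_le (by omega)
    rw [this, textinSubB_nil]
    simp

-- A's whole-word special case is what B's recursion computes anyway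
theorem subB_of_word (w : List Char)
    (h : PySem.Chars.lower w = "too".toList ∨ PySem.Chars.lower w = "two".toList ∨
         PySem.Chars.lower w = "to".toList) :
    textinSubB w = ['2'] := by
  rcases h with h | h | h
  · have hlen : w.length = 3 := by
      have := congrArg List.length h; simpa [PySem.Chars.lower] using this
    have ht : w.take 3 = w := List.take_of_length_le (by omega)
    rw [textinSubB, ht, if_pos (Or.inl h)]
    rw [List.drop_eq_nil_of_le (by omega), textinSubB_nil]
  · have hlen : w.length = 3 := by
      have := congrArg List.length h; simpa [PySem.Chars.lower] using this
    have ht : w.take 3 = w := List.take_of_length_le (by omega)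
    rw [textinSubB, ht, if_pos (Or.inr h)]
    rw [List.drop_eq_nil_of_le (by omega), textinSubB_nil]
  · have hlen : w.length = 2 := by
      have := congrArg List.length h; simpa [PySem.Chars.lower] using this
    have ht3 : w.take 3 = w := List.take_of_length_le (by omega)
    have ht2 : w.take 2 = w := List.take_of_length_le (by omega)
    rw [textinSubB, ht3, ht2]
    rw [if_neg (by rw [h]; decide), if_pos h]
    rw [List.drop_eq_nil_of_le (by omega), textinSubB_nil]

-- per word, A's branch (special case or scanning loop) equals B's sub
theorem word_eq (word : String) :
    (if PySem.Str.lower word ∈ ["too", "two", "to"] then "2"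
     else String.ofList (textinLoopA word.toList 0 [])) =
    String.ofList (textinSubB word.toList) := by
  split_ifs with hc
  · have hl : PySem.Chars.lower word.toList = "too".toList ∨
        PySem.Chars.lower word.toList = "two".toList ∨
        PySem.Chars.lower word.toList = "to".toList := by
      simp only [List.mem_cons, List.not_mem_nil, or_false] at hc
      rcases hc with h | h | h <;>
        [exact Or.inl (by rw [← PySem.Str.toList_lower, h]);
         exact Or.inr (Or.inl (by rw [← PySem.Str.toList_lower, h]));
         exact Or.inr (Or.inr (by rw [← PySem.Str.toList_lower, h]))]
    rw [subB_of_word word.toList hl]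
  · rw [textinLoopA_eq_subB]
    simp

-- ===== VERDICT (by name: the statement is the Claim_ definition above) =====
theorem textin_spec : Claim_equal_textin := by
  intro strng _
  unfold Spec_textin textin textin_alt
  dsimp only
  have hcg := PySem.List.foldl_congr_mem (PySem.Str.split₀ strng)
      (fun ret word => if PySem.Str.lower word ∈ ["too", "two", "to"] then ret ++ ["2"]
        else ret ++ [String.ofList (textinLoopA word.toList 0 [])])
      (fun ret word => ret ++ [String.ofList (textinSubB word.toList)]) []
      (fun acc word _ => by
        have hw2 := word_eq word
        dsimp only
        split_ifs at hw2 ⊢ with h <;> rw [hw2])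
  rw [hcg, PySem.List.foldl_append_singleton_eq_map]
  simp
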